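-- pv_equiv track=rewrite | github.com/hmaziad/preprocessing-techniques | Full_Implementation/data_Implementation/dataManipulation copy 2.py | getDialogueWithHistory
-- ===== SOURCE A (Python) =====
-- import copy
--
-- def getDialogueWithHistory(dialogues):
--     dialoguesWithHistory = copy.deepcopy(dialogues)
--
--     for dialogue in dialoguesWithHistory:
--         userRequest = ""
--         for pair in dialogue:
--             pair[0] = pair[0] + " " + userRequest
--             userRequest = pair[0]
--     return dialoguesWithHistory
-- ===== SOURCE B (Python) =====
-- def getDialogueWithHistory(dialogues):
--     result = []
--     for dialogue in dialogues:
--         new_dialogue = []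
--         for i, pair in enumerate(dialogue):
--             heads = [p[0] for p in reversed(dialogue[:i + 1])]
--             new_dialogue.append([" ".join(heads) + " "] + pair[1:])
--         result.append(new_dialogue)
--     return result
-- ===== Notes on version B (the rewrite author's own statement) =====
-- stated objective: alternative
-- what changed: B drops A's threaded mutable accumulator string: it rebuilds each turn's history independently as a join over the reversed prefix slice of original first elements, producing a fresh structure instead of mutating a deep copy.
import Mathlib
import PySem

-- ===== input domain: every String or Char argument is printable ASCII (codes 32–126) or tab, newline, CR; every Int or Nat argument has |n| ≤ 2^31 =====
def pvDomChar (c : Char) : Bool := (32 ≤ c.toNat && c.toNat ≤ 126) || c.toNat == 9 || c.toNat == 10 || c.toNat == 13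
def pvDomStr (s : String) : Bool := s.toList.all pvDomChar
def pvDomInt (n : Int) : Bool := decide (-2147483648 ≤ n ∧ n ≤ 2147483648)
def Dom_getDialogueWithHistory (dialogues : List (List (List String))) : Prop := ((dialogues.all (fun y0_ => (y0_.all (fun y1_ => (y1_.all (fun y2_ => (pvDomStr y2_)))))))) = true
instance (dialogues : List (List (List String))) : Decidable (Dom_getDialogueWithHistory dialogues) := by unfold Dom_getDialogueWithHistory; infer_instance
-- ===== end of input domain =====

-- B rebuilds each turn's history from the reversed prefix of original texts instead of
-- threading A's running accumulator string (objective: alternative decomposition, same cost).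
-- Return-value equivalence only: A mutates a deep copy, never its argument, so no observable side effects.

-- ===== PORT A =====
-- pair[0] read is pair.headD "" : Pre_ guarantees every pair is nonempty, where it equals pair[0].
-- The in-place mutation of the deep copy is rendered as a foldl carrying (pairs so far, userRequest).
def pvAStep (acc : List (List String) × String) (pair : List String) : List (List String) × String :=
  let nh := pair.headD "" ++ " " ++ acc.2        -- pair[0] = pair[0] + " " + userRequest
  (acc.1 ++ [nh :: pair.drop 1], nh)             -- userRequest = pair[0]

def getDialogueWithHistory (dialogues : List (List (List String))) : List (List (List String)) :=
  dialogues.map (fun dialogue => (dialogue.foldl pvAStep ([], "")).1)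

-- ===== PORT B =====
-- heads = [p[0] for p in reversed(dialogue[:i+1])]; new pair = [" ".join(heads) + " "] + pair[1:]
def getDialogueWithHistory_alt (dialogues : List (List (List String))) : List (List (List String)) :=
  dialogues.map (fun dialogue =>
    (PySem.List.enumerate dialogue 0).map (fun ip =>
      let heads := (PySem.List.slice dialogue none (some (ip.1 + 1))).reverse.map (fun p => p.headD "")
      (PySem.Str.join " " heads ++ " ") :: PySem.List.slice ip.2 (some 1) none))

-- ===== PRECONDITION & SPEC =====
-- Pre_ excludes exactly the inputs where Python A raises IndexError: a dialogue containing an empty pair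
-- (pair[0] assignment fails there; B's pair[0] read fails likewise).
def Pre_getDialogueWithHistory (dialogues : List (List (List String))) : Prop :=
  ∀ dlg ∈ dialogues, ∀ pair ∈ dlg, pair ≠ []
instance (dialogues : List (List (List String))) : Decidable (Pre_getDialogueWithHistory dialogues) := by unfold Pre_getDialogueWithHistory; infer_instance

def pvWitness_getDialogueWithHistory : List (List (List String)) :=
  [[["hi", "x"], ["how are you"]], [["bye"]]]

def Spec_getDialogueWithHistory (dialogues : List (List (List String))) (out : List (List (List String))) : Prop := out = getDialogueWithHistory_alt dialogues
instance (dialogues : List (List (List String))) (out : List (List (List String))) : Decidable (Spec_getDialogueWithHistory dialogues out) := by unfold Spec_getDialogueWithHistory; infer_instance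

-- ===== CLAIM (what is proved, stated in full; the proofs are below) =====
def Claim_equal_getDialogueWithHistory : Prop := ∀ (dialogues : List (List (List String))), Dom_getDialogueWithHistory dialogues → Pre_getDialogueWithHistory dialogues → Spec_getDialogueWithHistory dialogues (getDialogueWithHistory dialogues)

-- ===== LEMMAS AND PROOFS =====

-- A's accumulator value after consuming the pairs of `pre` (newest head first in hRev).
def pvHRev (pre : List (List String)) : List String := pre.reverse.map (fun p => p.headD "")

def pvJ (pre : List (List String)) : String :=
  match pvHRev pre with
  | [] => ""
  | hs => PySem.Str.join " " hs ++ " "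

theorem pvHRev_snoc (pre : List (List String)) (p : List String) :
    pvHRev (pre ++ [p]) = p.headD "" :: pvHRev pre := by
  simp [pvHRev]

theorem pvJ_snoc (pre : List (List String)) (p : List String) :
    pvJ (pre ++ [p]) = p.headD "" ++ " " ++ pvJ pre := by
  rw [pvJ, pvHRev_snoc]
  cases h : pvHRev pre with
  | nil =>
    simp only [pvJ, h]
    simp [PySem.Str.join]
  | cons b t =>
    simp only [pvJ, h]
    simp only [PySem.Str.join, String.reduceToList, List.map_cons, PySem.Chars.join_cons_cons]
    rw [String.ofList_append, String.ofList_append]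
    simp [String.append_assoc]

-- main invariant lemma
theorem pvMain (d : List (List String)) :
    ∀ (suf pre : List (List String)) (acc : List (List String)),
      pre ++ suf = d →
      (suf.foldl pvAStep (acc, pvJ pre)).1 =
        acc ++ (PySem.List.enumerate suf (pre.length : Int)).map (fun ip =>
          ((PySem.Str.join " " ((PySem.List.slice d none (some (ip.1 + 1))).reverse.map (fun p => p.headD "")) ++ " ") :: PySem.List.slice ip.2 (some 1) none)) := by
  intro suf
  induction suf with
  | nil => intro pre acc _; simp [PySem.List.enumerate]
  | cons p rest ih =>
    intro pre acc hd
    have hnh : p.headD "" ++ " " ++ pvJ pre = pvJ (pre ++ [p]) := (pvJ_snoc pre p).symm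
    have hih := ih (pre ++ [p]) (acc ++ [(p.headD "" ++ " " ++ pvJ pre) :: p.drop 1]) (by simpa using hd)
    rw [List.foldl_cons]
    show (rest.foldl pvAStep (acc ++ [(p.headD "" ++ " " ++ pvJ pre) :: p.drop 1], p.headD "" ++ " " ++ pvJ pre)).1 = _
    rw [hnh] at hih ⊢
    rw [hih, PySem.List.enumerate_cons, List.map_cons, List.append_assoc]
    congr 1
    rw [List.singleton_append]
    have hhead : pvJ (pre ++ [p]) =
        PySem.Str.join " " (List.map (fun q => q.headD "") (PySem.List.slice d none (some ((pre.length : Int) + 1))).reverse) ++ " " := by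
      have hcast : ((pre.length : Int) + 1) = ((pre.length + 1 : Nat) : Int) := by push_cast; ring
      have hslice : PySem.List.slice d none (some ((pre.length : Int) + 1)) = pre ++ [p] := by
        rw [hcast, PySem.List.slice_to_natCast, ← hd]
        simp [List.take_append]
      rw [hslice]
      have hh : (pre ++ [p]).reverse.map (fun q => q.headD "") = pvHRev (pre ++ [p]) := rfl
      rw [hh, pvJ, pvHRev_snoc]
    have htail : List.drop 1 p = PySem.List.slice p (some 1) none := by
      rw [PySem.List.slice_from_one, List.drop_one]
    have hstart : ((pre ++ [p]).length : Int) = (pre.length : Int) + 1 := by simp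
    rw [hstart]
    simp [hhead, htail]

-- ===== VERDICT (by name: the statement is the Claim_ definition above) =====
theorem getDialogueWithHistory_spec : Claim_equal_getDialogueWithHistory := by
  intro dialogues _ _
  unfold Spec_getDialogueWithHistory getDialogueWithHistory getDialogueWithHistory_alt
  apply List.map_congr_left
  intro d _
  have h := pvMain d d [] [] (by simp)
  simpa [pvJ, pvHRev] using h
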